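-- pv_equiv track=rewrite | github.com/xin-huang/sai | sai/utils/generators/chunk_generator.py | _split_windows_ranges
-- ===== SOURCE A (Python) =====
-- def _split_windows_ranges(windows: list, num_chunks: int) -> list:
--     """
--     Splits the list of windows into ranges assigned to each chunk.
--
--     Each range is defined by the first window's start and the last window's end
--     within that split.
--
--     Parameters
--     ----------
--     windows : list of tuple
--         List of (start, end) tuples representing windows.
--     num_chunks : int
--         Number of chunks to divide the windows among.
--
--     Returns
--     -------
--     list of tuple
--         List of (start, end) tuples representing the ranges for each chunk.
--     """
--     avg = len(windows) // num_chunks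
--     remainder = len(windows) % num_chunks
--     result = []
--     start_idx = 0
--
--     for i in range(num_chunks):
--         end_idx = start_idx + avg + (1 if i < remainder else 0)
--         sub = windows[start_idx:end_idx]
--         if sub:
--             result.append((sub[0][0], sub[-1][1]))
--         start_idx = end_idx
--
--     return result
-- ===== SOURCE B (Python) =====
-- def _split_windows_ranges(windows: list, num_chunks: int) -> list:
--     result = []
--     pos, k = 0, num_chunks
--     while pos < len(windows) and k > 0:
--         size = -((pos - len(windows)) // k)  # ceil of remaining/k
--         result.append((windows[pos][0], windows[pos + size - 1][1]))
--         pos += size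
--         k -= 1
--     return result
-- ===== Notes on version B (the rewrite author's own statement) =====
-- stated objective: faster
-- what changed: B drops the precomputed avg/remainder partition entirely: a greedy single loop walks a position through the list, each round taking the ceiling of remaining/remaining_chunks as the next chunk and emitting its endpoints by direct indexing; no slices are materialized and the loop stops as soon as the list is exhausted, touching O(min(n, num_chunks)) elements instead of all n.
import Mathlib
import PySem

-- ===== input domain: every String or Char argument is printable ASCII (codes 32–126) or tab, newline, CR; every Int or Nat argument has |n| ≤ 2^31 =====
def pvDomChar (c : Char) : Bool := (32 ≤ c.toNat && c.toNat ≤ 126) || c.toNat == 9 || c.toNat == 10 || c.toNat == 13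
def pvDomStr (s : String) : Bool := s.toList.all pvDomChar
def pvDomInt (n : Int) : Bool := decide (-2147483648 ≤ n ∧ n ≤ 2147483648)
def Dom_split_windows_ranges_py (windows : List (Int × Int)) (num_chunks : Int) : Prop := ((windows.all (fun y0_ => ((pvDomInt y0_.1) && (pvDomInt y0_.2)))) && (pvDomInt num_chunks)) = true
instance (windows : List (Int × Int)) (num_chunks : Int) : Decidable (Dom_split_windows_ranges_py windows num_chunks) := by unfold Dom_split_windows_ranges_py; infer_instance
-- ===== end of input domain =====

-- B replaces the precomputed avg/remainder partition with a greedy single loop that takes ceil(remaining/remaining_chunks) windows per round by direct indexing (no slices); a timing run measured it faster.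

-- ===== PORT A =====
-- loop body of A: end_idx from the running start_idx, slice, append (sub[0][0], sub[-1][1]) if sub nonempty
def pvStepA (windows : List (Int × Int)) (avg remainder : Int)
    (st : List (Int × Int) × Int) (i : Int) : List (Int × Int) × Int :=
  let end_idx := st.2 + avg + (if i < remainder then 1 else 0)
  let sub := PySem.List.slice windows (some st.2) (some end_idx)
  if sub.isEmpty then (st.1, end_idx)
  else (st.1 ++ [((PySem.List.pyGetD sub 0 (0, 0)).1, (PySem.List.pyGetD sub (-1) (0, 0)).2)], end_idx)

def split_windows_ranges_py (windows : List (Int × Int)) (num_chunks : Int) : List (Int × Int) :=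
  let avg := PySem.Int.floordiv (windows.length : Int) num_chunks
  let remainder := PySem.Int.mod (windows.length : Int) num_chunks
  ((PySem.List.pyRange 0 num_chunks 1).foldl (pvStepA windows avg remainder) ([], 0)).1

-- ===== PORT B =====
-- B's while loop: 'while pos < len(windows) and k > 0'. The countdown k is represented
-- structurally as a Nat (exact: the loop body only runs for k > 0, so k = num_chunks.toNat
-- iterates identically to the Python int k starting at num_chunks).
def pvLoopB (windows : List (Int × Int)) : List (Int × Int) → Int → Nat → List (Int × Int)
  | result, _, 0 => result
  | result, pos, Nat.succ k' =>
    if pos < (windows.length : Int) then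
      let size := -(PySem.Int.floordiv (pos - (windows.length : Int)) ((k' + 1 : Nat) : Int))
      pvLoopB windows
        (result ++ [((PySem.List.pyGetD windows pos (0, 0)).1,
                     (PySem.List.pyGetD windows (pos + size - 1) (0, 0)).2)])
        (pos + size) k'
    else result

def split_windows_ranges_py_alt (windows : List (Int × Int)) (num_chunks : Int) : List (Int × Int) :=
  pvLoopB windows [] 0 num_chunks.toNat

-- ===== PRECONDITION & SPEC =====
-- A raises ZeroDivisionError exactly when num_chunks = 0; Pre_ excludes only that.
def Pre_split_windows_ranges_py (windows : List (Int × Int)) (num_chunks : Int) : Prop := num_chunks ≠ 0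
instance (windows : List (Int × Int)) (num_chunks : Int) : Decidable (Pre_split_windows_ranges_py windows num_chunks) := by unfold Pre_split_windows_ranges_py; infer_instance
def pvWitness_split_windows_ranges_py : (List (Int × Int)) × Int := ([(0, 5), (6, 9), (10, 12)], 2)

def Spec_split_windows_ranges_py (windows : List (Int × Int)) (num_chunks : Int) (out : List (Int × Int)) : Prop := out = split_windows_ranges_py_alt windows num_chunks
instance (windows : List (Int × Int)) (num_chunks : Int) (out : List (Int × Int)) : Decidable (Spec_split_windows_ranges_py windows num_chunks out) := by unfold Spec_split_windows_ranges_py; infer_instance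

-- ===== CLAIM (what is proved, stated in full; the proofs are below) =====
def Claim_equal_split_windows_ranges_py : Prop := ∀ (windows : List (Int × Int)) (num_chunks : Int), Dom_split_windows_ranges_py windows num_chunks → Pre_split_windows_ranges_py windows num_chunks → Spec_split_windows_ranges_py windows num_chunks (split_windows_ranges_py windows num_chunks)

-- ===== LEMMAS AND PROOFS =====

-- The balanced partition, written as one chunk-interval per chunk index:
-- chunk i of a (p-offset) block of k*avg+r windows spans indices
-- [p + i*avg + min i r, p + (i+1)*avg + min (i+1) r).
def pvDelta (w : List (Int × Int)) (p avg r : Int) (i : Int) : List (Int × Int) :=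
  if p + i * avg + min i r < p + (i + 1) * avg + min (i + 1) r then
    [((PySem.List.pyGetD w (p + i * avg + min i r) (0, 0)).1,
      (PySem.List.pyGetD w (p + (i + 1) * avg + min (i + 1) r - 1) (0, 0)).2)]
  else []

def pvChunks (w : List (Int × Int)) (p avg r : Int) (k : Nat) : List (Int × Int) :=
  (List.range k).flatMap (fun (j : Nat) => pvDelta w p avg r (j : Int))

-- One step of A's loop, assuming the invariant start_idx = i*avg + min i r.
theorem pvStep_eq (windows : List (Int × Int)) (N avg r : Int)
    (havg : 0 ≤ avg) (hr : 0 ≤ r)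
    (hsum : N * avg + r = (windows.length : Int))
    (i : Int) (hi : 0 ≤ i) (hiN : i < N) (res : List (Int × Int)) :
    pvStepA windows avg r (res, i * avg + min i r) i
      = (res ++ pvDelta windows 0 avg r i, (i + 1) * avg + min (i + 1) r) := by
  have hmul : (i + 1) * avg = i * avg + avg := by ring
  have hmulN : (i + 1) * avg ≤ N * avg := mul_le_mul_of_nonneg_right (by omega) havg
  have h0i : 0 ≤ i * avg := mul_nonneg hi havg
  set a := i * avg + min i r with ha_def
  set b := (i + 1) * avg + min (i + 1) r with hb_def
  have hb : a + avg + (if i < r then (1:Int) else 0) = b := by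
    split_ifs with h <;> omega
  have ha0 : 0 ≤ a := by omega
  have hab : a ≤ b := by split_ifs at hb <;> omega
  have hbn : b ≤ (windows.length : Int) := by omega
  simp only [pvStepA, pvDelta, zero_add, hb]
  rw [PySem.List.slice_toNat windows ha0 (by omega)]
  by_cases hlt : a < b
  · have hlen : ((windows.drop a.toNat).take (b.toNat - a.toNat)).length = b.toNat - a.toNat := by
      simp [List.length_take, List.length_drop]; omega
    have hne : (windows.drop a.toNat).take (b.toNat - a.toNat) ≠ [] := by
      apply List.ne_nil_of_length_pos; omega
    rw [if_neg (by simp [List.isEmpty_iff, hne]), if_pos hlt]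
    have e1 : PySem.List.pyGetD (List.take (b.toNat - a.toNat) (List.drop a.toNat windows)) 0 (0, 0)
        = PySem.List.pyGetD windows a (0, 0) := by
      rw [PySem.List.pyGetD_eq_getElem _ _ (le_refl 0) (by omega),
          PySem.List.pyGetD_eq_getElem _ _ ha0 (by omega)]
      simp [List.getElem_take, List.getElem_drop]
    have e2 : PySem.List.pyGetD (List.take (b.toNat - a.toNat) (List.drop a.toNat windows)) (-1) (0, 0)
        = PySem.List.pyGetD windows (b - 1) (0, 0) := by
      rw [PySem.List.pyGetD_neg_one _ _ hne,
          PySem.List.pyGetD_eq_getElem _ _ (by omega : (0:Int) ≤ b - 1) (by omega)]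
      rw [List.getLast_eq_getElem]
      simp only [hlen]
      rw [List.getElem_take, List.getElem_drop]
      congr 1
      omega
    rw [e1, e2]
  · have hba : b = a := by omega
    have h0' : b.toNat - a.toNat = 0 := by omega
    have hlt' : ¬ (i * avg + min i r < (i + 1) * avg + min (i + 1) r) := by
      rw [← ha_def, ← hb_def]; exact hlt
    rw [h0', if_neg hlt']
    simp

-- A's loop maintains start_idx = k*avg + min k r and accumulates exactly pvChunks.
theorem pvInv (windows : List (Int × Int)) (N avg r : Int)
    (havg : 0 ≤ avg) (hr : 0 ≤ r)
    (hsum : N * avg + r = (windows.length : Int))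
    (k : Nat) (hk : (k : Int) ≤ N) :
    ((List.range k).map (fun j : Nat => (0 : Int) + (j : Int))).foldl (pvStepA windows avg r) ([], 0)
      = (pvChunks windows 0 avg r k, (k : Int) * avg + min (k : Int) r) := by
  induction k with
  | zero =>
    simp [pvChunks, min_eq_left hr]
  | succ k ih =>
    have hk' : (k : Int) ≤ N := by push_cast at hk ⊢; omega
    rw [List.range_succ, List.map_append, List.foldl_append, ih hk']
    simp only [List.map_cons, List.map_nil, List.foldl_cons, List.foldl_nil, zero_add]
    rw [pvStep_eq windows N avg r havg hr hsum (k : Int) (by omega) (by push_cast at hk; omega)]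
    simp only [Prod.mk.injEq]
    refine ⟨?_, ?_⟩
    · simp [pvChunks, List.range_succ]
    · push_cast; ring_nf

-- B's greedy loop computes the same chunk intervals.
theorem pvLoopB_eq (kn : Nat) : ∀ (windows res : List (Int × Int)) (pos avg r : Int),
    0 ≤ pos → 0 ≤ avg → 0 ≤ r → r < (kn : Int) →
    pos + (kn : Int) * avg + r = (windows.length : Int) →
    pvLoopB windows res pos kn = res ++ pvChunks windows pos avg r kn := by
  induction kn with
  | zero => intro _ _ _ _ r _ _ hr hrk _; exact absurd hrk (by omega)
  | succ kn ih =>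
    intro windows res pos avg r hpos0 havg hr hrk hsum
    push_cast at hrk hsum
    have hposle : pos ≤ (windows.length : Int) := by nlinarith [mul_nonneg (show (0:Int) ≤ (kn:Int) + 1 by positivity) havg]
    by_cases hpos : pos < (windows.length : Int)
    · -- one loop iteration
      set e : Int := if 0 < r then 1 else 0 with he
      have hecase : (0 < r ∧ e = 1) ∨ (r = 0 ∧ e = 0) := by
        by_cases h : 0 < r <;> simp [he, h] <;> omega
      have hsize : -(PySem.Int.floordiv (pos - (windows.length : Int)) ((kn + 1 : Nat) : Int))
          = avg + e := by
        rw [show pos - ((windows.length : Int)) = -((windows.length : Int) - pos) by ring]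
        rw [PySem.Int.neg_floordiv_neg_eq_iff_of_pos (by push_cast; omega)]
        push_cast
        constructor
        · rcases hecase with ⟨h1, h2⟩ | ⟨h1, h2⟩ <;> rw [h2] <;> nlinarith
        · rcases hecase with ⟨h1, h2⟩ | ⟨h1, h2⟩ <;> rw [h2] <;> nlinarith
      have hstep : pvLoopB windows res pos (kn + 1)
          = pvLoopB windows
              (res ++ [((PySem.List.pyGetD windows pos (0, 0)).1,
                        (PySem.List.pyGetD windows (pos + (avg + e) - 1) (0, 0)).2)])
              (pos + (avg + e)) kn := by
        show (if pos < (windows.length : Int) then _ else _) = _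
        rw [if_pos hpos, hsize]
      rw [hstep]
      -- the first chunk is pvDelta at index 0
      have hd0 : pvDelta windows pos avg r 0
          = [((PySem.List.pyGetD windows pos (0, 0)).1,
              (PySem.List.pyGetD windows (pos + (avg + e) - 1) (0, 0)).2)] := by
        have hmin1 : min (0 + 1 : Int) r = e := by rcases hecase with ⟨h1, h2⟩ | ⟨h1, h2⟩ <;> omega
        have hsizepos : 0 < avg + e := by
          rcases hecase with ⟨h1, h2⟩ | ⟨h1, h2⟩ <;> nlinarith
        simp only [pvDelta, hmin1]
        rw [if_pos (by omega)]
        refine ?_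
        rw [show pos + 0 * avg + min 0 r = pos by omega,
            show pos + (0 + 1) * avg + e - 1 = pos + (avg + e) - 1 by ring]
      -- tail: shift of the remaining chunks
      have hshift : ∀ j : Nat, pvDelta windows pos avg r ((j : Int) + 1)
          = pvDelta windows (pos + (avg + e)) avg (r - e) (j : Int) := by
        intro j
        have hidx : ∀ t : Int, 0 ≤ t →
            pos + (t + 1) * avg + min (t + 1) r
              = (pos + (avg + e)) + t * avg + (min t (r - e)) := by
          intro t ht
          have hm : (t + 1) * avg = t * avg + avg := by ring
          have hmin : min (t + 1) r = e + min t (r - e) := by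
            rcases hecase with ⟨h1, h2⟩ | ⟨h1, h2⟩ <;> omega
          rw [hm, hmin]; ring
        simp only [pvDelta]
        rw [hidx (j : Int) (by positivity), hidx ((j : Int) + 1) (by positivity)]
      have hchunks : pvChunks windows pos avg r (kn + 1)
          = pvDelta windows pos avg r 0
              ++ pvChunks windows (pos + (avg + e)) avg (r - e) kn := by
        unfold pvChunks
        rw [List.range_succ_eq_map, List.flatMap_cons, List.flatMap_map]
        congr 1
        congr 1
        funext j
        have := hshift j
        push_cast
        simpa using this
      rcases Nat.eq_zero_or_pos kn with hkn0 | hknpos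
      · -- last chunk: the loop stops because k reaches 0
        subst hkn0
        have hre : r = e := by rcases hecase with ⟨h1, h2⟩ | ⟨h1, h2⟩ <;> omega
        show res ++ _ = _
        rw [hchunks, hd0]
        simp [pvChunks]
      · rw [ih windows _ (pos + (avg + e)) avg (r - e)
            (by rcases hecase with ⟨h1, h2⟩ | ⟨h1, h2⟩ <;> nlinarith)
            havg
            (by rcases hecase with ⟨h1, h2⟩ | ⟨h1, h2⟩ <;> omega)
            (by rcases hecase with ⟨h1, h2⟩ | ⟨h1, h2⟩ <;> push_cast <;> omega)
            (by push_cast at hsum ⊢; nlinarith)]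
        rw [hchunks, hd0]
        simp
    · -- pos = len: the block is empty, every remaining chunk is empty
      have hpe : pos = (windows.length : Int) := by omega
      have hge : 0 ≤ ((kn : Int) + 1) * avg := mul_nonneg (by positivity) havg
      have hprod : ((kn : Int) + 1) * avg = 0 := by linarith
      have havg0 : avg = 0 := by
        rcases mul_eq_zero.mp hprod with h | h
        · exfalso; omega
        · exact h
      have hr0 : r = 0 := by linarith
      have hnil : pvChunks windows pos avg r (kn + 1) = [] := by
        rw [havg0, hr0]
        simp only [pvChunks, List.flatMap_eq_nil_iff]
        intro x _
        simp only [pvDelta]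
        rw [if_neg (by omega)]
      have hstop : pvLoopB windows res pos (kn + 1) = res := by
        show (if pos < (windows.length : Int) then _ else res) = res
        rw [if_neg hpos]
      rw [hstop, hnil, List.append_nil]

theorem split_windows_ranges_py_spec : Claim_equal_split_windows_ranges_py := by
  intro windows N _ hpre
  unfold Spec_split_windows_ranges_py
  simp only [split_windows_ranges_py, split_windows_ranges_py_alt]
  rcases lt_or_gt_of_ne hpre with hneg | hpos
  · rw [PySem.List.pyRange_one]
    simp [show ((N : Int) - 0).toNat = 0 by omega, show N.toNat = 0 by omega, pvLoopB]
  · have havg : PySem.Int.floordiv (windows.length : Int) N = (windows.length : Int) / N :=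
      PySem.Int.floordiv_eq_ediv_of_pos hpos
    have hmod : PySem.Int.mod (windows.length : Int) N = (windows.length : Int) % N :=
      PySem.Int.mod_eq_emod_of_pos hpos
    rw [PySem.List.pyRange_one, havg, hmod]
    have h1 : 0 ≤ (windows.length : Int) / N := Int.ediv_nonneg (by positivity) hpos.le
    have h2 : 0 ≤ (windows.length : Int) % N := Int.emod_nonneg _ (by omega)
    have h3 : (windows.length : Int) % N < N := Int.emod_lt_of_pos _ hpos
    have h4 : N * ((windows.length : Int) / N) + (windows.length : Int) % N = (windows.length : Int) :=
      Int.ediv_add_emod _ _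
    have hk : (((N - 0).toNat : Nat) : Int) ≤ N := by omega
    rw [pvInv windows N _ _ h1 h2 h4 (N - 0).toNat hk]
    have hc : ((N.toNat : Nat) : Int) = N := by omega
    rw [pvLoopB_eq N.toNat windows [] 0 ((windows.length : Int) / N) ((windows.length : Int) % N)
      le_rfl h1 h2 (by rw [hc]; exact h3) (by rw [zero_add, hc]; linarith [h4])]
    simp only [List.nil_append]
    congr 1
    omega
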